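-- pv_equiv track=rewrite | github.com/jasminemina/workout-upload-to-csv | streamlit_app.py | enrich_data
-- ===== SOURCE A (Python) =====
-- def enrich_data(exercises):
--     """Adds muscle groups, demo links, and summary."""
--     # --- Placeholder Logic ---
--     # 1. Load muscle map (from dict, JSON, etc.)
--     # Example:
--     muscle_map = {
--          "Squat": "Quads, Glutes, Hamstrings", # Add many more
--          "Bench Press": "Chest, Triceps, Shoulders"
--      }
--     for ex in exercises:
--          # Basic lookup, needs better matching (lowercase, remove details)
--          simple_name = ex["Exercise"].split('-')[0].strip().title() # Very basic cleanup
--          ex["Muscle Group"] = muscle_map.get(simple_name, "Unknown")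
--          # 2. Add Demo Link (Requires YouTube API - complex setup with keys)
--          # For simplicity, using a placeholder search link
--          query = ex['Exercise'].replace(' ','+')
--          ex["Demo"] = f"https://www.youtube.com/results?search_query={query}+demonstration"
--
--     # 3. Generate Summary (Simple keyword-based)
--     summary_words = []
--     if any("Squat" in ex["Exercise"] or "Leg Press" in ex["Exercise"] for ex in exercises): summary_words.append("Leg Day")
--     if any("Bench" in ex["Exercise"] or "Push Up" in ex["Exercise"] for ex in exercises): summary_words.append("Push Focus")
--     if any("Row" in ex["Exercise"] or "Pull Down" in ex["Exercise"] for ex in exercises): summary_words.append("Pull Focus")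
--     if not summary_words: summary_words.append("General Workout")
--
--     # Add user's specific request phrase if relevant (requires more logic)
--     # if pain_syndrome_detected: summary_words.append("addressing patellofemoral pain")
--
--     summary = ", ".join(summary_words)[:50] # Limit length
--
--     return exercises, summary
-- ===== SOURCE B (Python) =====
-- def enrich_data(exercises):
--     """Adds muscle groups, demo links, and summary (single pass)."""
--     muscle_map = {
--         "Squat": "Quads, Glutes, Hamstrings",
--         "Bench Press": "Chest, Triceps, Shoulders",
--     }
--     leg = push = pull = False
--     for ex in exercises:
--         name = ex["Exercise"]
--         simple_name = name.split('-')[0].strip().title()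
--         ex["Muscle Group"] = muscle_map.get(simple_name, "Unknown")
--         ex["Demo"] = "https://www.youtube.com/results?search_query=" + name.replace(' ', '+') + "+demonstration"
--         leg = leg or "Squat" in name or "Leg Press" in name
--         push = push or "Bench" in name or "Push Up" in name
--         pull = pull or "Row" in name or "Pull Down" in name
--     words = [w for w, hit in (("Leg Day", leg), ("Push Focus", push), ("Pull Focus", pull)) if hit]
--     summary = ", ".join(words or ["General Workout"])[:50]
--     return exercises, summary
-- ===== Notes on version B (the rewrite author's own statement) =====
-- stated objective: simpler
-- what changed: Folds the three keyword detections into the single enrichment pass via three booleans, replacing A's three separate any() scans over the list, and builds the summary from those flags.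
import Mathlib
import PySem

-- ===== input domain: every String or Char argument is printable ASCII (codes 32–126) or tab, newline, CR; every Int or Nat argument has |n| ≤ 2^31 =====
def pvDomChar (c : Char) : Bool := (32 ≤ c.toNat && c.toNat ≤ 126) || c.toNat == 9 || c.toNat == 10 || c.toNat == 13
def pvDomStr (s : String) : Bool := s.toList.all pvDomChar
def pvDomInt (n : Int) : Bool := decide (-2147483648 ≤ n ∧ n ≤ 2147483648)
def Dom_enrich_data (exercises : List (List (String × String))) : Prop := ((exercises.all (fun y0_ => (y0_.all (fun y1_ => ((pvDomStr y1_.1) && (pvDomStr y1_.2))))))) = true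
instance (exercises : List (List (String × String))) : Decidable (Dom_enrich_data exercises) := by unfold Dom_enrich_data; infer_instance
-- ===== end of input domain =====

-- B folds the three keyword detections into the single enrichment pass (three booleans) instead of
-- A's three separate any() scans; equivalence is about the RETURN value only (Python A mutates the
-- ex dicts in place, B performs the same mutation).

-- ===== PORT A =====
-- str.title() ported by hand (exact on the ASCII domain: a cased char after a non-cased char is
-- uppercased, a cased char after a cased char is lowercased, others kept)
def pvTitleChars : List Char → Bool → List Char
  | [], _ => []
  | c :: rest, prev =>
    if c.isAlpha then (if prev then c.toLower else c.toUpper) :: pvTitleChars rest true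
    else c :: pvTitleChars rest false

def pvTitle (s : String) : String := String.ofList (pvTitleChars s.toList false)

-- ex["Exercise"] (Pre_ guarantees the key is present; getD "" is never the KeyError case inside Pre_)
def pvName (ex : List (String × String)) : String :=
  ((PySem.Dict.mk ex).get? "Exercise").getD ""

-- the shared per-exercise body of both Pythons' loops (muscle map lookup, demo link, two dict writes)
def pvEnrich (ex : List (String × String)) : List (String × String) :=
  let name := pvName ex
  let simple_name := pvTitle (PySem.Str.strip (((PySem.Str.split? name "-").getD []).headD ""))
  let mg := (PySem.Dict.mk [("Squat", "Quads, Glutes, Hamstrings"),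
                            ("Bench Press", "Chest, Triceps, Shoulders")]).getD simple_name "Unknown"
  let demo := PySem.Str.join "" ["https://www.youtube.com/results?search_query=",
                                 PySem.Str.replace name " " "+", "+demonstration"]
  (((PySem.Dict.mk ex).insert "Muscle Group" mg).insert "Demo" demo).items

def enrich_data (exercises : List (List (String × String))) : (List (List (String × String))) × String :=
  let enriched := exercises.map pvEnrich
  let summary_words :=
    (if enriched.any (fun ex => PySem.Str.isIn "Squat" (pvName ex) || PySem.Str.isIn "Leg Press" (pvName ex))
       then ["Leg Day"] else []) ++
    (if enriched.any (fun ex => PySem.Str.isIn "Bench" (pvName ex) || PySem.Str.isIn "Push Up" (pvName ex))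
       then ["Push Focus"] else []) ++
    (if enriched.any (fun ex => PySem.Str.isIn "Row" (pvName ex) || PySem.Str.isIn "Pull Down" (pvName ex))
       then ["Pull Focus"] else [])
  let summary_words := if summary_words.isEmpty then ["General Workout"] else summary_words
  (enriched, PySem.Str.slice (PySem.Str.join ", " summary_words) none (some 50))

-- ===== PORT B =====
def enrich_data_alt (exercises : List (List (String × String))) : (List (List (String × String))) × String :=
  let st := exercises.foldl
    (fun (st : List (List (String × String)) × Bool × Bool × Bool) ex =>
      let name := pvName ex
      (st.1 ++ [pvEnrich ex],
       st.2.1 || PySem.Str.isIn "Squat" name || PySem.Str.isIn "Leg Press" name,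
       st.2.2.1 || PySem.Str.isIn "Bench" name || PySem.Str.isIn "Push Up" name,
       st.2.2.2 || PySem.Str.isIn "Row" name || PySem.Str.isIn "Pull Down" name))
    ([], false, false, false)
  let words :=
    (if st.2.1 then ["Leg Day"] else []) ++
    (if st.2.2.1 then ["Push Focus"] else []) ++
    (if st.2.2.2 then ["Pull Focus"] else [])
  let words := if words.isEmpty then ["General Workout"] else words
  (st.1, PySem.Str.slice (PySem.Str.join ", " words) none (some 50))

-- ===== PRECONDITION & SPEC =====
-- Pre_ excludes exactly the inputs where some exercise dict lacks the "Exercise" key, on which A raises KeyError.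
def Pre_enrich_data (exercises : List (List (String × String))) : Prop :=
  ∀ ex ∈ exercises, (PySem.Dict.mk ex).contains "Exercise" = true
instance (exercises : List (List (String × String))) : Decidable (Pre_enrich_data exercises) := by
  unfold Pre_enrich_data; infer_instance

def pvWitness_enrich_data : (List (List (String × String))) :=
  [[("Exercise", "Squat - 3x5"), ("Sets", "3")], [("Exercise", "Row")]]

def Spec_enrich_data (exercises : List (List (String × String))) (out : (List (List (String × String))) × String) : Prop := out = enrich_data_alt exercises
instance (exercises : List (List (String × String))) (out : (List (List (String × String))) × String) : Decidable (Spec_enrich_data exercises out) := by unfold Spec_enrich_data; infer_instance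

-- ===== CLAIM (what is proved, stated in full; the proofs are below) =====
def Claim_equal_enrich_data : Prop := ∀ (exercises : List (List (String × String))), Dom_enrich_data exercises → Pre_enrich_data exercises → Spec_enrich_data exercises (enrich_data exercises)

-- ===== LEMMAS AND PROOFS =====

-- the two inserts do not touch the "Exercise" entry
theorem pvName_pvEnrich (ex : List (String × String)) : pvName (pvEnrich ex) = pvName ex := by
  simp [pvName, pvEnrich, PySem.Dict.get?_insert_of_ne _ _ (by decide : ("Exercise" : String) ≠ "Demo"),
        PySem.Dict.get?_insert_of_ne _ _ (by decide : ("Exercise" : String) ≠ "Muscle Group")]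

def pvStep (st : List (List (String × String)) × Bool × Bool × Bool) (ex : List (String × String)) :
    List (List (String × String)) × Bool × Bool × Bool :=
  let name := pvName ex
  (st.1 ++ [pvEnrich ex],
   st.2.1 || PySem.Str.isIn "Squat" name || PySem.Str.isIn "Leg Press" name,
   st.2.2.1 || PySem.Str.isIn "Bench" name || PySem.Str.isIn "Push Up" name,
   st.2.2.2 || PySem.Str.isIn "Row" name || PySem.Str.isIn "Pull Down" name)

theorem pvFold_spec (l : List (List (String × String)))
    (acc : List (List (String × String))) (b1 b2 b3 : Bool) :
    l.foldl pvStep (acc, b1, b2, b3) =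
      (acc ++ l.map pvEnrich,
       b1 || l.any (fun ex => PySem.Str.isIn "Squat" (pvName ex) || PySem.Str.isIn "Leg Press" (pvName ex)),
       b2 || l.any (fun ex => PySem.Str.isIn "Bench" (pvName ex) || PySem.Str.isIn "Push Up" (pvName ex)),
       b3 || l.any (fun ex => PySem.Str.isIn "Row" (pvName ex) || PySem.Str.isIn "Pull Down" (pvName ex))) := by
  induction l generalizing acc b1 b2 b3 with
  | nil => simp
  | cons ex rest ih => simp [pvStep, ih, Bool.or_assoc]

-- ===== VERDICT (by name: the statement is the Claim_ definition above) =====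
theorem enrich_data_spec : Claim_equal_enrich_data := by
  intro exercises _ _
  show enrich_data exercises = enrich_data_alt exercises
  unfold enrich_data enrich_data_alt
  rw [show (fun (st : List (List (String × String)) × Bool × Bool × Bool) ex =>
        let name := pvName ex
        (st.1 ++ [pvEnrich ex],
         st.2.1 || PySem.Str.isIn "Squat" name || PySem.Str.isIn "Leg Press" name,
         st.2.2.1 || PySem.Str.isIn "Bench" name || PySem.Str.isIn "Push Up" name,
         st.2.2.2 || PySem.Str.isIn "Row" name || PySem.Str.isIn "Pull Down" name)) = pvStep from rfl,
      pvFold_spec]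
  simp [List.any_map, Function.comp, pvName_pvEnrich]
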